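-- pv_equiv track=rewrite | github.com/AudioCommons/ac-mediator | services/acservice/json_template.py | headTailOfPath
-- ===== SOURCE A (Python) =====
-- def headTailOfPath(path):
--     parts = path.split('/')
--     head = ''
--     tail = ''
--     headEnded = False
--     parCount = 0
--     for part in parts:
--         if (headEnded):
--             tail += '/' + part
--         else:
--             head += '/' + part
--             if not part.endswith('\\'):
--                 parCount = parCount + part.count('(') - part.count(')')
--                 if parCount == 0:
--                     headEnded = True
--     return (head[1:], tail[1:])
-- ===== SOURCE B (Python) =====
-- def headTailOfPath(path):
--     # Find how many leading parts belong to the head (first point where the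
--     # paren count balances, skipping backslash-terminated parts), then join slices.
--     parts = path.split('/')
--     n = 0
--     parCount = 0
--     for part in parts:
--         n += 1
--         if not part.endswith('\\'):
--             parCount += part.count('(') - part.count(')')
--             if parCount == 0:
--                 break
--     return ('/'.join(parts[:n]), '/'.join(parts[n:]))
-- ===== Notes on version B (the rewrite author's own statement) =====
-- stated objective: simpler
-- what changed: Replaces A's interleaved head/tail string accumulation with a headEnded flag by a single boundary-finding pass (count leading parts until the paren count balances) followed by two slice-joins.
import Mathlib
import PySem

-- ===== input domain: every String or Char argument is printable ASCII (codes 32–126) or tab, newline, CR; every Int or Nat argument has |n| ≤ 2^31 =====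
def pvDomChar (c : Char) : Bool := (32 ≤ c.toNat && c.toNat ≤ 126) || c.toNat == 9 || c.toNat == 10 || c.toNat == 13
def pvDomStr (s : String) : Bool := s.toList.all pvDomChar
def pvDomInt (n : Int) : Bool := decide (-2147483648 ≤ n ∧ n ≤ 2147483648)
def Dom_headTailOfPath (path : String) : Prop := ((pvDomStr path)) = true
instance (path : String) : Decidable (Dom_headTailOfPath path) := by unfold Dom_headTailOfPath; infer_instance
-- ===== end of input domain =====

-- B replaces A's interleaved head/tail accumulation (headEnded flag) by one boundary-counting pass + two slice-joins; equivalence proved for all strings.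

-- ===== PORT A =====
-- loop body of A: state (head, tail, headEnded, parCount)
def headTailStep (s : List Char × List Char × Bool × Int) (part : List Char) :
    List Char × List Char × Bool × Int :=
  match s with
  | (head, tail, headEnded, parCount) =>
    if headEnded then (head, tail ++ '/' :: part, headEnded, parCount)
    else
      let head' := head ++ '/' :: part
      if ! PySem.Chars.endswith part ['\\'] then
        let parCount' := parCount + (PySem.Chars.count part ['('] : Int)
            - (PySem.Chars.count part [')'] : Int)
        if parCount' = 0 then (head', tail, true, parCount')
        else (head', tail, false, parCount')
      else (head', tail, headEnded, parCount)

def headTailOfPath (path : String) : String × String :=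
  let parts := PySem.Chars.splitOn path.toList ['/']
  let st := parts.foldl headTailStep ([], [], false, 0)
  (String.ofList (PySem.List.slice st.1 (some 1) none),
   String.ofList (PySem.List.slice st.2.1 (some 1) none))

-- ===== PORT B =====
-- number of leading parts that form the head (first point the paren count balances)
def headLen : List (List Char) → Int → Nat
  | [], _ => 0
  | part :: rest, parCount =>
    if ! PySem.Chars.endswith part ['\\'] then
      let parCount' := parCount + (PySem.Chars.count part ['('] : Int)
          - (PySem.Chars.count part [')'] : Int)
      if parCount' = 0 then 1 else 1 + headLen rest parCount'
    else 1 + headLen rest parCount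

def headTailOfPath_alt (path : String) : String × String :=
  let parts := PySem.Chars.splitOn path.toList ['/']
  let n := headLen parts 0
  (String.ofList (PySem.Chars.join ['/'] (parts.take n)),
   String.ofList (PySem.Chars.join ['/'] (parts.drop n)))

-- ===== PRECONDITION & SPEC =====
def Spec_headTailOfPath (path : String) (out : String × String) : Prop := out = headTailOfPath_alt path
instance (path : String) (out : String × String) : Decidable (Spec_headTailOfPath path out) := by unfold Spec_headTailOfPath; infer_instance

-- ===== CLAIM (what is proved, stated in full; the proofs are below) =====
def Claim_equal_headTailOfPath : Prop := ∀ (path : String), Dom_headTailOfPath path → Spec_headTailOfPath path (headTailOfPath path)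

-- ===== LEMMAS AND PROOFS =====

-- '/'-prefixed concatenation of a list of parts
def slashPre (parts : List (List Char)) : List Char :=
  parts.flatMap (fun p => '/' :: p)

theorem join_slash_eq_drop_slashPre (parts : List (List Char)) :
    PySem.Chars.join ['/'] parts = (slashPre parts).drop 1 := by
  induction parts with
  | nil => simp [PySem.Chars.join_nil, slashPre]
  | cons p rest ih =>
    cases rest with
    | nil => simp [PySem.Chars.join_singleton, slashPre]
    | cons q r =>
      rw [PySem.Chars.join_cons_cons, ih]
      simp [slashPre, List.flatMap_cons]

-- once headEnded is true, head is frozen and tail collects everything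
theorem foldl_step_ended (parts : List (List Char)) (h t : List Char) (c : Int) :
    parts.foldl headTailStep (h, t, true, c)
      = (h, t ++ slashPre parts, true, c) := by
  induction parts generalizing t with
  | nil => simp [slashPre]
  | cons p rest ih =>
    simp only [List.foldl_cons, headTailStep, if_pos]
    rw [ih]
    simp [slashPre, List.flatMap_cons]

-- main loop invariant: the fold splits the remaining parts at headLen
theorem foldl_step_eq (parts : List (List Char)) (h t : List Char) (c : Int) :
    ((parts.foldl headTailStep (h, t, false, c)).1,
     (parts.foldl headTailStep (h, t, false, c)).2.1)
      = (h ++ slashPre (parts.take (headLen parts c)),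
         t ++ slashPre (parts.drop (headLen parts c))) := by
  induction parts generalizing h c with
  | nil => simp [headLen, slashPre]
  | cons p rest ih =>
    by_cases he : PySem.Chars.endswith p ['\\'] = true
    · have : headLen (p :: rest) c = 1 + headLen rest c := by
        simp [headLen, he]
      rw [this]
      simp only [List.foldl_cons, headTailStep, if_neg (by simp : ¬ (false = true)), he]
      simp only [Bool.not_true, if_neg (by simp : ¬ (false = true))]
      rw [ih, Nat.add_comm 1 _]
      simp [slashPre, List.flatMap_cons, List.take_succ_cons, List.drop_succ_cons]
    · have he' : PySem.Chars.endswith p ['\\'] = false := by simp [he]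
      set c' := c + (PySem.Chars.count p ['('] : Int) - (PySem.Chars.count p [')'] : Int) with hc'
      by_cases hz : c' = 0
      · have : headLen (p :: rest) c = 1 := by
          simp [headLen, he', ← hc', hz]
        rw [this]
        simp only [List.foldl_cons, headTailStep, if_neg (by simp : ¬ (false = true)), he']
        simp only [Bool.not_false, if_pos, ← hc', if_pos hz]
        rw [foldl_step_ended]
        simp [slashPre, List.flatMap_cons]
      · have : headLen (p :: rest) c = 1 + headLen rest c' := by
          simp [headLen, he', ← hc', hz]
        rw [this]
        simp only [List.foldl_cons, headTailStep, if_neg (by simp : ¬ (false = true)), he']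
        simp only [Bool.not_false, if_pos, ← hc', if_neg hz]
        rw [ih, Nat.add_comm 1 _]
        simp [slashPre, List.flatMap_cons, List.take_succ_cons, List.drop_succ_cons]

-- ===== VERDICT (by name: the statement is the Claim_ definition above) =====
theorem headTailOfPath_spec : Claim_equal_headTailOfPath := by
  intro path _
  unfold Spec_headTailOfPath headTailOfPath headTailOfPath_alt
  dsimp only
  have hmain := foldl_step_eq (PySem.Chars.splitOn path.toList ['/']) [] [] 0
  have h1 := congrArg Prod.fst hmain
  have h2 := congrArg Prod.snd hmain
  simp only [] at h1 h2
  rw [PySem.List.slice_from _ (by norm_num : (0:Int) ≤ 1),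
      PySem.List.slice_from _ (by norm_num : (0:Int) ≤ 1)]
  rw [h1, h2, join_slash_eq_drop_slashPre, join_slash_eq_drop_slashPre]
  simp
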